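-- pv_equiv track=rewrite | github.com/Chaitra1817/CodingSolutions | 3440. Reschedule Meetings for Maximum Free Time II.py | maxFreeTime
-- ===== SOURCE A (Python) =====
-- from typing import List
--
-- def maxFreeTime(eventTime: int, startTime: List[int], endTime: List[int]) -> int:
--     startTime.append(eventTime)
--     endTime.append(eventTime)
--     n = len(startTime)
--
--     gaps = []
--     prev = 0
--     for i in range(n):
--         gap = startTime[i] - prev
--         gaps.append((gap, i))
--         prev = endTime[i]
--
--     top3 = sorted(gaps, reverse=True)[:3]
--
--     max_val = 0
--     for i in range(n):
--         duration = endTime[i] - startTime[i]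
--
--         g1 = startTime[i] - (endTime[i - 1] if i > 0 else 0)
--         next_start = startTime[i + 1] if i + 1 < n else eventTime
--         g2 = next_start - endTime[i]
--
--         alt_gaps = [g for g, idx in top3 if idx != i and idx != i + 1]
--         best_alt = alt_gaps[0] if alt_gaps else 0
--
--         if best_alt >= duration:
--             max_val = max(max_val, g1 + g2 + duration)
--         else:
--             max_val = max(max_val, g1 + g2)
--
--     return max_val
-- ===== SOURCE B (Python) =====
-- from typing import List
--
-- def maxFreeTime(eventTime: int, startTime: List[int], endTime: List[int]) -> int:
--     startTime.append(eventTime)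
--     endTime.append(eventTime)
--     n = len(startTime)
--
--     # gap preceding meeting i, computed directly (no running prev)
--     gaps = [startTime[i] - (endTime[i - 1] if i > 0 else 0) for i in range(n)]
--
--     # one linear pass keeping the three lexicographically largest (gap, index) pairs
--     b1 = b2 = b3 = None
--     for i, g in enumerate(gaps):
--         p = (g, i)
--         if b1 is None or p > b1:
--             b1, b2, b3 = p, b1, b2
--         elif b2 is None or p > b2:
--             b2, b3 = p, b2
--         elif b3 is None or p > b3:
--             b3 = p
--
--     best = 0
--     for i in range(n):
--         duration = endTime[i] - startTime[i]
--         g1 = gaps[i]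
--         g2 = gaps[i + 1] if i + 1 < n else eventTime - endTime[i]
--         alt = 0
--         for t in (b1, b2, b3):
--             if t is not None and t[1] != i and t[1] != i + 1:
--                 alt = t[0]
--                 break
--         total = g1 + g2 + duration if alt >= duration else g1 + g2
--         if total > best:
--             best = total
--     return best
-- ===== Notes on version B (the rewrite author's own statement) =====
-- stated objective: faster
-- what changed: B replaces A's full O(n log n) sort of all (gap, index) pairs by a single linear pass that keeps only the three lexicographically largest pairs, and reads neighbour gaps from a precomputed gap list instead of recomputing them from the raw arrays.
import Mathlib
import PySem

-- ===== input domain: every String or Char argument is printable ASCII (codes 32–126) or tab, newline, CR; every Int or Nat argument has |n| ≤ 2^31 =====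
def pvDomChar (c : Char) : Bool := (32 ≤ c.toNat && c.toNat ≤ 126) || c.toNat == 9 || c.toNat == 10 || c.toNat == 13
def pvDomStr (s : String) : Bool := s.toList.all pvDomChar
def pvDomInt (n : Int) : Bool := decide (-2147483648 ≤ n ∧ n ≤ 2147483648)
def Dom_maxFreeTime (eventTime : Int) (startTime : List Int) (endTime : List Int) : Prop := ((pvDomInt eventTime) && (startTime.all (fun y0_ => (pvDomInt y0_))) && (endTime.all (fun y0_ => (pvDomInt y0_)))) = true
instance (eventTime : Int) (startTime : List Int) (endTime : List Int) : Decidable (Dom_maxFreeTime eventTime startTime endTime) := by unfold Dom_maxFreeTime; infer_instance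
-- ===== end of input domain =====

-- B replaces A's full sort of all gaps by a single linear pass keeping the three largest
-- (gap, index) pairs, and reads neighbour gaps from the precomputed gap list instead of
-- recomputing them from the raw arrays (objective: faster).
-- Both A and B append to startTime/endTime in place (the same mutation); the equivalence
-- proved here is about the RETURN value.

-- ===== PORT A =====
def maxFreeTime (eventTime : Int) (startTime : List Int) (endTime : List Int) : Int :=
  let st := startTime ++ [eventTime]
  let et := endTime ++ [eventTime]
  let n : Int := PySem.List.len st
  -- gaps = []; prev = 0; for i in range(n): gaps.append((st[i] - prev, i)); prev = et[i]
  let gaps := ((PySem.List.pyRange 0 n 1).foldl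
      (fun (s : List (Int × Int) × Int) i =>
        (s.1 ++ [(PySem.List.pyGetD st i 0 - s.2, i)], PySem.List.pyGetD et i 0))
      ([], 0)).1
  -- top3 = sorted(gaps, reverse=True)[:3]  (Python compares the tuples lexicographically)
  let top3 := (PySem.List.sorted2 gaps Prod.fst Prod.snd true).take 3
  (PySem.List.pyRange 0 n 1).foldl
    (fun maxVal i =>
      let duration := PySem.List.pyGetD et i 0 - PySem.List.pyGetD st i 0
      let g1 := PySem.List.pyGetD st i 0 - (if 0 < i then PySem.List.pyGetD et (i - 1) 0 else 0)
      let nextStart := if i + 1 < n then PySem.List.pyGetD st (i + 1) 0 else eventTime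
      let g2 := nextStart - PySem.List.pyGetD et i 0
      let altGaps := (top3.filter (fun p => !(p.2 == i) && !(p.2 == i + 1))).map Prod.fst
      let bestAlt := altGaps.headD 0
      if bestAlt ≥ duration then max maxVal (g1 + g2 + duration) else max maxVal (g1 + g2)) 0

-- ===== PORT B =====
-- Python tuple comparison p > q on int pairs
def pvPairGt (p q : Int × Int) : Bool := p.1 > q.1 || (p.1 == q.1 && p.2 > q.2)

-- the if/elif chain updating (b1, b2, b3) with a new pair p
def pvPush (t : Option (Int × Int) × Option (Int × Int) × Option (Int × Int)) (p : Int × Int) :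
    Option (Int × Int) × Option (Int × Int) × Option (Int × Int) :=
  if t.1.elim true (fun q => pvPairGt p q) then (some p, t.1, t.2.1)
  else if t.2.1.elim true (fun q => pvPairGt p q) then (t.1, some p, t.2.1)
  else if t.2.2.elim true (fun q => pvPairGt p q) then (t.1, t.2.1, some p)
  else t

-- 'if t is not None and t[1] != i and t[1] != i + 1'
def pvHit (o : Option (Int × Int)) (i : Int) : Bool :=
  match o with
  | none => false
  | some q => !(q.2 == i) && !(q.2 == i + 1)

-- 'for t in (b1, b2, b3): if …: alt = t[0]; break'
def pvAlt (t : Option (Int × Int) × Option (Int × Int) × Option (Int × Int)) (i : Int) : Int :=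
  if pvHit t.1 i then (t.1.getD (0, 0)).1
  else if pvHit t.2.1 i then (t.2.1.getD (0, 0)).1
  else if pvHit t.2.2 i then (t.2.2.getD (0, 0)).1
  else 0

def maxFreeTime_alt (eventTime : Int) (startTime : List Int) (endTime : List Int) : Int :=
  let st := startTime ++ [eventTime]
  let et := endTime ++ [eventTime]
  let n : Int := PySem.List.len st
  -- gaps = [st[i] - (et[i-1] if i > 0 else 0) for i in range(n)]
  let gaps := (PySem.List.pyRange 0 n 1).map
      (fun i => PySem.List.pyGetD st i 0 - (if 0 < i then PySem.List.pyGetD et (i - 1) 0 else 0))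
  -- one pass: for i, g in enumerate(gaps): push (g, i)
  let t := (PySem.List.enumerate gaps 0).foldl (fun t ig => pvPush t (ig.2, ig.1))
      (none, none, none)
  (PySem.List.pyRange 0 n 1).foldl
    (fun best i =>
      let duration := PySem.List.pyGetD et i 0 - PySem.List.pyGetD st i 0
      let g1 := PySem.List.pyGetD gaps i 0
      let g2 := if i + 1 < n then PySem.List.pyGetD gaps (i + 1) 0
                else eventTime - PySem.List.pyGetD et i 0
      let alt := pvAlt t i
      let total := if alt ≥ duration then g1 + g2 + duration else g1 + g2
      if total > best then total else best) 0

-- ===== PRECONDITION & SPEC =====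
-- Exactly where the Python A returns: with len(endTime) < len(startTime) its first loop
-- reads endTime past the end and raises IndexError (B raises there too).
def Pre_maxFreeTime (eventTime : Int) (startTime : List Int) (endTime : List Int) : Prop :=
  startTime.length ≤ endTime.length
instance (eventTime : Int) (startTime : List Int) (endTime : List Int) : Decidable (Pre_maxFreeTime eventTime startTime endTime) := by unfold Pre_maxFreeTime; infer_instance

def pvWitness_maxFreeTime : Int × List Int × List Int := (10, [1, 4], [2, 6])

def Spec_maxFreeTime (eventTime : Int) (startTime : List Int) (endTime : List Int) (out : Int) : Prop := out = maxFreeTime_alt eventTime startTime endTime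
instance (eventTime : Int) (startTime : List Int) (endTime : List Int) (out : Int) : Decidable (Spec_maxFreeTime eventTime startTime endTime out) := by unfold Spec_maxFreeTime; infer_instance

-- ===== CLAIM (what is proved, stated in full; the proofs are below) =====
def Claim_equal_maxFreeTime : Prop := ∀ (eventTime : Int) (startTime : List Int) (endTime : List Int), Dom_maxFreeTime eventTime startTime endTime → Pre_maxFreeTime eventTime startTime endTime → Spec_maxFreeTime eventTime startTime endTime (maxFreeTime eventTime startTime endTime)

-- ===== LEMMAS AND PROOFS =====

-- the comparison sorted2 … true uses, spelled out
def pvBef (a b : Int × Int) : Bool :=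
  decide (b.1 < a.1) || (!decide (a.1 < b.1) && decide (b.2 < a.2))

lemma pvBef_eq_pairGt (a b : Int × Int) : pvBef a b = pvPairGt a b := by
  simp only [pvBef, pvPairGt]
  rcases lt_trichotomy a.1 b.1 with h | h | h <;> simp [h, ne_of_lt, lt_asymm]

lemma sorted2_rev_eq_foldl (xs : List (Int × Int)) :
    PySem.List.sorted2 xs Prod.fst Prod.snd true =
      xs.foldl (fun acc x => PySem.List.insertBy pvBef x acc) [] := rfl

def pvTripleOf (l : List (Int × Int)) :
    Option (Int × Int) × Option (Int × Int) × Option (Int × Int) :=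
  (l[0]?, l[1]?, l[2]?)

lemma insertBy_pvBef_nil (p : Int × Int) : PySem.List.insertBy pvBef p [] = [p] := rfl
lemma insertBy_pvBef_cons (p a : Int × Int) (l : List (Int × Int)) :
    PySem.List.insertBy pvBef p (a :: l) =
      if pvBef p a then p :: a :: l else a :: PySem.List.insertBy pvBef p l := rfl

lemma push_tripleOf (p : Int × Int) (l : List (Int × Int)) :
    pvPush (pvTripleOf l) p = pvTripleOf (PySem.List.insertBy pvBef p l) := by
  rcases l with _ | ⟨a, _ | ⟨b, _ | ⟨c, rest⟩⟩⟩ <;>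
    simp only [insertBy_pvBef_nil, insertBy_pvBef_cons, pvPush, pvTripleOf, pvBef_eq_pairGt,
      Option.elim] <;>
    split_ifs <;> simp_all

lemma foldl_push_tripleOf (ps : List (Int × Int)) (l : List (Int × Int)) :
    ps.foldl (fun t p => pvPush t p) (pvTripleOf l) =
      pvTripleOf (ps.foldl (fun acc x => PySem.List.insertBy pvBef x acc) l) := by
  induction ps generalizing l with
  | nil => rfl
  | cons p ps ih => simp only [List.foldl_cons, push_tripleOf, ih]

lemma alt_eq_headD (S : List (Int × Int)) (i : Int) :
    pvAlt (pvTripleOf S) i =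
      (((S.take 3).filter (fun p => !(p.2 == i) && !(p.2 == i + 1))).map Prod.fst).headD 0 := by
  rcases S with _ | ⟨a, _ | ⟨b, _ | ⟨c, rest⟩⟩⟩ <;>
    simp only [pvAlt, pvTripleOf, pvHit, List.take, List.filter_cons, List.filter_nil] <;>
    split_ifs <;> simp_all

-- A's first loop computes (the (gap, index) pairs, the final prev)
lemma loopA_eq (st et : List Int) (m : Nat) :
    ((PySem.List.pyRange 0 (m : Int) 1).foldl
        (fun (s : List (Int × Int) × Int) i =>
          (s.1 ++ [(PySem.List.pyGetD st i 0 - s.2, i)], PySem.List.pyGetD et i 0))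
        ([], 0)) =
      ((PySem.List.pyRange 0 (m : Int) 1).map
          (fun i => (PySem.List.pyGetD st i 0 -
            (if 0 < i then PySem.List.pyGetD et (i - 1) 0 else 0), i)),
        if m = 0 then 0 else PySem.List.pyGetD et ((m : Int) - 1) 0) := by
  induction m with
  | zero => simp [PySem.List.pyRange_one_eq_nil]
  | succ m ih =>
      have h : ((m + 1 : Nat) : Int) = (m : Int) + 1 := by push_cast; ring
      rw [h, PySem.List.pyRange_one_succ_right (by positivity)]
      simp only [List.foldl_append, List.map_append, List.foldl_cons, List.foldl_nil,
        List.map_cons, List.map_nil, ih]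
      have hg : (if m = 0 then (0 : Int) else PySem.List.pyGetD et ((m : Int) - 1) 0) =
          (if 0 < (m : Int) then PySem.List.pyGetD et ((m : Int) - 1) 0 else 0) := by
        rcases Nat.eq_zero_or_pos m with hm | hm
        · simp [hm]
        · have h2 : (0 : Int) < (m : Int) := by exact_mod_cast hm
          have h3 : m ≠ 0 := by omega
          rw [if_neg h3, if_pos h2]
      rw [hg]
      simp

-- B's one-pass fold equals the triple of head elements of the insertion-sorted pairs
lemma topB_eq (f : Int → Int) (N : Int) (hN : 0 ≤ N) :
    (PySem.List.enumerate ((PySem.List.pyRange 0 N 1).map f) 0).foldl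
        (fun t ig => pvPush t (ig.2, ig.1)) (none, none, none) =
      pvTripleOf (((PySem.List.pyRange 0 N 1).map (fun i => (f i, i))).foldl
        (fun acc x => PySem.List.insertBy pvBef x acc) []) := by
  rw [PySem.List.enumerate_eq_map_pyRange _ (0 : Int)]
  have hlen : PySem.List.len ((PySem.List.pyRange 0 N 1).map f) = N := by
    simp [PySem.List.len_eq, PySem.List.length_pyRange_one]
    omega
  rw [hlen, List.foldl_map, List.foldl_map]
  rw [PySem.List.foldl_congr_mem _ _ (fun t j => pvPush t (f j, j)) _ (by
    intro acc x hx
    obtain ⟨h0, h1⟩ := PySem.List.mem_pyRange_one.mp hx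
    rw [PySem.List.pyGetD_map_pyRange_of_nonneg f N x 0 h0 h1])]
  simpa [List.foldl_map, pvTripleOf] using
    foldl_push_tripleOf ((PySem.List.pyRange 0 N 1).map (fun j => (f j, j))) []

lemma max_eq_if (b x : Int) : max b x = if x > b then x else b := by
  rcases max_cases b x with ⟨h1, h2⟩ | ⟨h1, h2⟩ <;> rw [h1] <;> split_ifs <;> omega

theorem maxFreeTime_eq_alt (eventTime : Int) (startTime : List Int) (endTime : List Int) :
    maxFreeTime eventTime startTime endTime = maxFreeTime_alt eventTime startTime endTime := by
  simp only [maxFreeTime, maxFreeTime_alt]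
  have hn : PySem.List.len (startTime ++ [eventTime]) = ((startTime.length + 1 : Nat) : Int) := by
    simp [PySem.List.len_eq]
  rw [hn, loopA_eq, topB_eq _ _ (by positivity)]
  rw [← sorted2_rev_eq_foldl]
  apply PySem.List.foldl_congr_mem
  intro acc x hx
  obtain ⟨h0, h1⟩ := PySem.List.mem_pyRange_one.mp hx
  rw [PySem.List.pyGetD_map_pyRange_of_nonneg _ _ _ _ h0 h1]
  rw [alt_eq_headD]
  have hg2 : (if x + 1 < ((startTime.length + 1 : Nat) : Int) then
        PySem.List.pyGetD ((PySem.List.pyRange 0 ((startTime.length + 1 : Nat) : Int) 1).map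
          (fun i => PySem.List.pyGetD (startTime ++ [eventTime]) i 0 -
            (if 0 < i then PySem.List.pyGetD (endTime ++ [eventTime]) (i - 1) 0 else 0))) (x + 1) 0
      else eventTime - PySem.List.pyGetD (endTime ++ [eventTime]) x 0) =
      (if x + 1 < ((startTime.length + 1 : Nat) : Int) then
        PySem.List.pyGetD (startTime ++ [eventTime]) (x + 1) 0
      else eventTime) - PySem.List.pyGetD (endTime ++ [eventTime]) x 0 := by
    split_ifs with h2
    · rw [PySem.List.pyGetD_map_pyRange_of_nonneg _ _ _ _ (by omega) h2]
      have h3 : (0 : Int) < x + 1 := by omega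
      rw [if_pos h3]
      ring_nf
    · ring
  rw [hg2, max_eq_if, max_eq_if]
  split_ifs <;> rfl

-- ===== VERDICT (by name: the statement is the Claim_ definition above) =====
theorem maxFreeTime_spec : Claim_equal_maxFreeTime := by
  intro eventTime startTime endTime _ _
  unfold Spec_maxFreeTime
  exact maxFreeTime_eq_alt eventTime startTime endTime
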